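-- pv_equiv track=rewrite | github.com/Nopnoplaaivay/cmv-trading-bot | backend/modules/portfolio/services/processors/portfolio_risk_calculator.py | _calculate_drawdown_periods
-- ===== SOURCE A (Python) =====
-- def _calculate_drawdown_periods(is_drawdown_series):
--     drawdown_periods = []
--     current_dd_length = 0
--
--     for is_dd in is_drawdown_series:
--         if is_dd:
--             current_dd_length += 1
--         else:
--             if current_dd_length > 0:
--                 drawdown_periods.append(current_dd_length)
--             current_dd_length = 0
--
--     # Handle case nếu kết thúc trong drawdown
--     if current_dd_length > 0:
--         drawdown_periods.append(current_dd_length)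
--
--     return drawdown_periods
-- ===== SOURCE B (Python) =====
-- def _calculate_drawdown_periods(is_drawdown_series):
--     # Two-pointer run scan: find each maximal run of equal truthiness,
--     # emit its length when the run is truthy.
--     s = is_drawdown_series
--     out = []
--     i = 0
--     n = len(s)
--     while i < n:
--         j = i
--         while j < n and bool(s[j]) == bool(s[i]):
--             j += 1
--         if s[i]:
--             out.append(j - i)
--         i = j
--     return out
-- ===== Notes on version B (the rewrite author's own statement) =====
-- stated objective: alternative
-- what changed: Replaces A's counter/flush state machine (increment a running counter, flush it on each falsy element and once after the loop) by a two-pointer run scan that locates each maximal run of equal truthiness and emits the run's length when it is truthy; no trailing-flush special case is needed.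
import Mathlib
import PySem

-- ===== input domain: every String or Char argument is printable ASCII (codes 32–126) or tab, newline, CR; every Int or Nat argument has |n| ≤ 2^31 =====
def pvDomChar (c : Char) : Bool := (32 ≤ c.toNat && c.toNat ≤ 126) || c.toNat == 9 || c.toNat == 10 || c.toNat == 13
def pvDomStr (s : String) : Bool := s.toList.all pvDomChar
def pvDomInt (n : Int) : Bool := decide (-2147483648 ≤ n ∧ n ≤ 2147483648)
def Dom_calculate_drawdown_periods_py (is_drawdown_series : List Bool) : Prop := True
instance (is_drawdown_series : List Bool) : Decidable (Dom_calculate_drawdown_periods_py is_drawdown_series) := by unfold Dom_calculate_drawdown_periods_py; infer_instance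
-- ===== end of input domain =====

-- ===== PORT A =====
-- B differs from A: A keeps a running counter flushed on falsy elements (plus a
-- trailing flush); B scans maximal runs with two pointers and emits truthy run lengths.
def calculate_drawdown_periods_py (is_drawdown_series : List Bool) : List Int :=
  let st := is_drawdown_series.foldl
    (fun (s : List Int × Int) is_dd =>
      if is_dd then (s.1, s.2 + 1)
      else (if s.2 > 0 then s.1 ++ [s.2] else s.1, 0))
    ([], 0)
  if st.2 > 0 then st.1 ++ [st.2] else st.1

-- ===== PORT B =====
-- B's inner while loop 'advance j while same truthiness' is the span of the run:
-- takeWhile/dropWhile on (· == head); recursion continues on the rest of the list.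
def calculate_drawdown_periods_py_alt : List Bool → List Int
  | [] => []
  | b :: xs =>
    let grp := xs.takeWhile (fun x => x == b)
    let rest := xs.dropWhile (fun x => x == b)
    (if b then [((1 : Int) + grp.length)] else []) ++ calculate_drawdown_periods_py_alt rest
termination_by xs => xs.length
decreasing_by
  simpa using Nat.lt_succ_of_le (xs.length_dropWhile_le (fun x => x == b))

-- ===== PRECONDITION & SPEC =====
def Spec_calculate_drawdown_periods_py (is_drawdown_series : List Bool) (out : List Int) : Prop := out = calculate_drawdown_periods_py_alt is_drawdown_series
instance (is_drawdown_series : List Bool) (out : List Int) : Decidable (Spec_calculate_drawdown_periods_py is_drawdown_series out) := by unfold Spec_calculate_drawdown_periods_py; infer_instance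

-- ===== CLAIM =====
def Claim_equal_calculate_drawdown_periods_py : Prop := ∀ (is_drawdown_series : List Bool), Dom_calculate_drawdown_periods_py is_drawdown_series → Spec_calculate_drawdown_periods_py is_drawdown_series (calculate_drawdown_periods_py is_drawdown_series)

-- ===== LEMMAS AND PROOFS =====

-- A's loop from counter state c, acc stripped off (proof-side characterisation).
def gA : Int → List Bool → List Int
  | c, [] => if c > 0 then [c] else []
  | c, true :: xs => gA (c + 1) xs
  | c, false :: xs => (if c > 0 then [c] else []) ++ gA 0 xs

theorem foldl_eq_gA (xs : List Bool) : ∀ (acc : List Int) (c : Int),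
    (let st := xs.foldl
        (fun (s : List Int × Int) is_dd =>
          if is_dd then (s.1, s.2 + 1)
          else (if s.2 > 0 then s.1 ++ [s.2] else s.1, 0))
        (acc, c)
      if st.2 > 0 then st.1 ++ [st.2] else st.1) = acc ++ gA c xs := by
  induction xs with
  | nil => intro acc c; simp only [List.foldl_nil, gA]; split_ifs <;> simp
  | cons b ys ih =>
    intro acc c
    cases b with
    | true => simpa [gA] using ih acc (c + 1)
    | false =>
      simp only [List.foldl_cons, Bool.false_eq_true, if_false]
      by_cases h : c > 0
      · rw [if_pos h, ih (acc ++ [c]) 0]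
        simp [gA, h]
      · rw [if_neg h, ih acc 0]
        simp [gA, h]

theorem alt_dropFalse (ys : List Bool) :
    calculate_drawdown_periods_py_alt (ys.dropWhile (fun x => x == false)) =
      calculate_drawdown_periods_py_alt ys := by
  cases ys with
  | nil => rfl
  | cons b zs =>
    cases b with
    | true => simp [List.dropWhile]
    | false =>
      rw [show calculate_drawdown_periods_py_alt (false :: zs) =
        calculate_drawdown_periods_py_alt (zs.dropWhile (fun x => x == false)) from by
          simp [calculate_drawdown_periods_py_alt]]
      simp [List.dropWhile]

theorem gA_eq_alt (n : ℕ) : ∀ (xs : List Bool), xs.length = n →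
    (gA 0 xs = calculate_drawdown_periods_py_alt xs ∧
     ∀ c : Int, 0 < c → gA c xs =
       (c + (xs.takeWhile (fun x => x == true)).length) ::
         calculate_drawdown_periods_py_alt (xs.dropWhile (fun x => x == true))) := by
  induction n using Nat.strong_induction_on with
  | _ n ih =>
    intro xs hlen
    cases xs with
    | nil =>
      refine ⟨by simp [gA, calculate_drawdown_periods_py_alt], fun c hc => ?_⟩
      simp [gA, hc, calculate_drawdown_periods_py_alt]
    | cons b ys =>
      have hys : ys.length < n := by simp [← hlen]
      have IH := ih ys.length hys ys rfl
      cases b with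
      | true =>
        constructor
        · rw [show gA 0 (true :: ys) = gA 1 ys from rfl, IH.2 1 one_pos]
          simp [calculate_drawdown_periods_py_alt]
        · intro c hc
          rw [show gA c (true :: ys) = gA (c + 1) ys from rfl, IH.2 (c + 1) (by omega)]
          simp only [List.takeWhile_cons, List.dropWhile_cons, beq_self_eq_true, if_true,
            List.length_cons]
          congr 1
          push_cast
          ring
      | false =>
        have h0 : gA 0 (false :: ys) = calculate_drawdown_periods_py_alt (false :: ys) := by
          rw [show gA 0 (false :: ys) = gA 0 ys from by simp [gA], IH.1]
          rw [show calculate_drawdown_periods_py_alt (false :: ys) =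
            calculate_drawdown_periods_py_alt (ys.dropWhile (fun x => x == false)) from by
              simp [calculate_drawdown_periods_py_alt]]
          rw [alt_dropFalse]
        refine ⟨h0, fun c hc => ?_⟩
        rw [show gA c (false :: ys) = (if c > 0 then [c] else []) ++ gA 0 ys from rfl]
        rw [if_pos hc, IH.1]
        have halt : calculate_drawdown_periods_py_alt (false :: ys) =
            calculate_drawdown_periods_py_alt ys := by
          rw [show calculate_drawdown_periods_py_alt (false :: ys) =
            calculate_drawdown_periods_py_alt (ys.dropWhile (fun x => x == false)) from by
              simp [calculate_drawdown_periods_py_alt]]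
          exact alt_dropFalse ys
        simp [List.takeWhile, List.dropWhile, halt]

-- ===== VERDICT =====
theorem calculate_drawdown_periods_py_spec : Claim_equal_calculate_drawdown_periods_py := by
  intro xs _
  unfold Spec_calculate_drawdown_periods_py calculate_drawdown_periods_py
  rw [foldl_eq_gA xs [] 0]
  simpa using (gA_eq_alt xs.length xs rfl).1
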